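-- pv_equiv track=rewrite | github.com/CreepyMemes/ImageToSTL | src/functions.py | getStitchingCoords
-- ===== SOURCE A (Python) =====
-- def getStitchingCoords(rows, cols):
--     coords = []
--     xa, za = (0, 0)
--     for i in range(cols + rows - 2):
--         if i < rows:
--             z = i
--         else:
--             z = rows - 1
--             xa += 1
--         if i+1 < cols:
--             x = i+1
--         else:
--             x = cols - 1
--             za += 1
--         coords.append((z, xa))
--         coords.append((za, x))
--     return coords
-- ===== SOURCE B (Python) =====
-- def getStitchingCoords(rows, cols):
--     # Build the two stitch tracks separately (ramp phase then saturated phase),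
--     # then interleave them.
--     n = cols + rows - 2
--     zramp = range(min(n, rows))
--     left = [(i, 0) for i in zramp] + \
--            [(rows - 1, k) for k in range(1, n - len(zramp) + 1)]
--     xramp = range(min(n, cols - 1))
--     right = [(0, i + 1) for i in xramp] + \
--             [(k, cols - 1) for k in range(1, n - len(xramp) + 1)]
--     return [p for lr in zip(left, right) for p in lr]
-- ===== Notes on version B (the rewrite author's own statement) =====
-- stated objective: alternative
-- what changed: Instead of one loop with if/else branches and two mutable counters, B builds the two stitch tracks separately as ramp-phase + saturated-phase list comprehensions and interleaves them with zip.
import Mathlib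
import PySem

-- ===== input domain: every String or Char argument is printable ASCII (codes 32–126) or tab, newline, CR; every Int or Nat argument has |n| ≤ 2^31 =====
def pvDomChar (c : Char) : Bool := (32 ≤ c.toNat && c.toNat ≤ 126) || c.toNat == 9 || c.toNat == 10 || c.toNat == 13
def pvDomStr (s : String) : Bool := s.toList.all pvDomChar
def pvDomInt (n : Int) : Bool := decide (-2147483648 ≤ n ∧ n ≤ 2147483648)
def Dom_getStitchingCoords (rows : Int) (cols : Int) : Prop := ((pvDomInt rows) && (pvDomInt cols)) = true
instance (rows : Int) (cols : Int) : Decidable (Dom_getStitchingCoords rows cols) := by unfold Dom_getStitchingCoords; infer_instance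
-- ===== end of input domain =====

-- B builds the two stitch tracks separately (ramp phase then saturated phase) and
-- interleaves them with zip, instead of A's single loop with branches and counters
-- (objective: alternative decomposition, same cost).

-- ===== PORT A =====
-- one loop iteration of A: updates (coords, xa, za) for index i
def pvStepA (rows : Int) (cols : Int) (s : List (Int × Int) × Int × Int) (i : Int) :
    List (Int × Int) × Int × Int :=
  let coords := s.1
  let xa := s.2.1
  let za := s.2.2
  let p1 := if i < rows then (i, xa) else (rows - 1, xa + 1)
  let p2 := if i + 1 < cols then (i + 1, za) else (cols - 1, za + 1)
  (coords ++ [(p1.1, p1.2), (p2.2, p2.1)], p1.2, p2.2)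

def getStitchingCoords (rows : Int) (cols : Int) : List (Int × Int) :=
  ((PySem.List.pyRange 0 (cols + rows - 2) 1).foldl (pvStepA rows cols) ([], 0, 0)).1

-- ===== PORT B =====
-- the 'left' track: (z, xa) pairs — ramp phase then saturated phase
def pvLeft (rows : Int) (n : Int) : List (Int × Int) :=
  let zramp := PySem.List.pyRange 0 (min n rows) 1
  zramp.map (fun i => (i, (0 : Int))) ++
    (PySem.List.pyRange 1 (n - zramp.length + 1) 1).map (fun k => (rows - 1, k))

-- the 'right' track: (za, x) pairs — ramp phase then saturated phase
def pvRight (cols : Int) (n : Int) : List (Int × Int) :=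
  let xramp := PySem.List.pyRange 0 (min n (cols - 1)) 1
  xramp.map (fun i => ((0 : Int), i + 1)) ++
    (PySem.List.pyRange 1 (n - xramp.length + 1) 1).map (fun k => (k, cols - 1))

def getStitchingCoords_alt (rows : Int) (cols : Int) : List (Int × Int) :=
  let n := cols + rows - 2
  ((pvLeft rows n).zip (pvRight cols n)).flatMap (fun p => [p.1, p.2])

-- ===== PRECONDITION & SPEC =====
def Spec_getStitchingCoords (rows : Int) (cols : Int) (out : List (Int × Int)) : Prop := out = getStitchingCoords_alt rows cols
instance (rows : Int) (cols : Int) (out : List (Int × Int)) : Decidable (Spec_getStitchingCoords rows cols out) := by unfold Spec_getStitchingCoords; infer_instance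

-- ===== CLAIM (what is proved, stated in full; the proofs are below) =====
def Claim_equal_getStitchingCoords : Prop := ∀ (rows : Int) (cols : Int), Dom_getStitchingCoords rows cols → Spec_getStitchingCoords rows cols (getStitchingCoords rows cols)

-- ===== LEMMAS AND PROOFS =====

-- the two pairs both programs effectively emit at loop index i, in closed form
def pvPairs (rows : Int) (cols : Int) (i : Int) : List (Int × Int) :=
  [(min i (rows - 1), max 0 (i + 1 - max rows 0)),
   (max 0 (i + 1 - max (cols - 1) 0), min (i + 1) (cols - 1))]

-- A-side invariant: after m iterations A's state is the flatMap of pvPairs plus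
-- the closed-form values of the two accumulators
lemma pv_key (rows cols : Int) : ∀ m : Nat,
    (PySem.List.pyRange 0 (m : Int) 1).foldl (pvStepA rows cols) ([], 0, 0)
      = ((PySem.List.pyRange 0 (m : Int) 1).flatMap (pvPairs rows cols),
         max 0 ((m : Int) - max rows 0), max 0 ((m : Int) - max (cols - 1) 0)) := by
  intro m
  induction m with
  | zero =>
      simp [PySem.List.pyRange_one_eq_nil (le_refl (0 : Int))]
  | succ k ih =>
      have hcast : ((k + 1 : Nat) : Int) = (k : Int) + 1 := by push_cast; ring
      rw [hcast, PySem.List.pyRange_one_succ_right (by positivity),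
          List.foldl_append, List.flatMap_append, ih]
      simp only [List.foldl_cons, List.foldl_nil, List.flatMap_cons, List.flatMap_nil,
        List.append_nil, pvStepA, pvPairs]
      split_ifs with h1 h2 h2 <;>
        refine Prod.ext ?_ (Prod.ext ?_ ?_) <;>
        simp only [List.append_cancel_left_eq, List.cons.injEq, Prod.mk.injEq, and_true] <;>
        omega

-- B-side step lemma: extending the bound by one appends one closed-form pair
lemma pv_left_succ (rows : Int) (k : Nat) :
    pvLeft rows ((k : Int) + 1)
      = pvLeft rows k ++ [(min (k : Int) (rows - 1), max 0 ((k : Int) + 1 - max rows 0))] := by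
  unfold pvLeft
  simp only [PySem.List.length_pyRange_one]
  by_cases h : (k : Int) < rows
  · have h1 : min ((k : Int) + 1) rows = (k : Int) + 1 := by omega
    have h2 : min (k : Int) rows = (k : Int) := by omega
    have h3 : ((min ((k:Int)+1) rows - 0).toNat : Int) = (k : Int) + 1 := by
      rw [h1]; omega
    have h4 : ((min (k:Int) rows - 0).toNat : Int) = (k : Int) := by
      rw [h2]; omega
    have hnil1 : PySem.List.pyRange 1 ((k:Int)+1 - ((min ((k:Int)+1) rows - 0).toNat : Int) + 1) 1 = [] :=
      PySem.List.pyRange_one_eq_nil (by omega)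
    have hnil2 : PySem.List.pyRange 1 ((k:Int) - ((min (k:Int) rows - 0).toNat : Int) + 1) 1 = [] :=
      PySem.List.pyRange_one_eq_nil (by omega)
    rw [hnil1, hnil2, h1, h2, PySem.List.pyRange_one_succ_right (by omega)]
    simp only [List.map_append, List.map_cons, List.map_nil, List.append_nil]
    have : min (k : Int) (rows - 1) = (k : Int) := by omega
    have hz : max (0:Int) ((k : Int) + 1 - max rows 0) = 0 := by omega
    simp [h]
  · have h1 : min ((k : Int) + 1) rows = min (k : Int) rows := by omega
    have h4 : ((min (k:Int) rows - 0).toNat : Int) = max rows 0 ⊓ (k : Int) := by omega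
    rw [h1]
    have hle : (1:Int) ≤ (k:Int) - ((min (k:Int) rows - 0).toNat : Int) + 1 := by
      rw [h4]; omega
    rw [show (k:Int) + 1 - ((min (k:Int) rows - 0).toNat : Int) + 1
          = ((k:Int) - ((min (k:Int) rows - 0).toNat : Int) + 1) + 1 by ring,
        PySem.List.pyRange_one_succ_right hle]
    simp only [List.map_append, List.map_cons, List.map_nil, List.append_assoc]
    have hm : min (k : Int) (rows - 1) = rows - 1 := by omega
    have hv : (k:Int) - ((min (k:Int) rows - 0).toNat : Int) + 1
        = max 0 ((k : Int) + 1 - max rows 0) := by rw [h4]; omega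
    rw [hm, hv]

lemma pv_right_succ (cols : Int) (k : Nat) :
    pvRight cols ((k : Int) + 1)
      = pvRight cols k ++ [(max 0 ((k : Int) + 1 - max (cols - 1) 0), min ((k : Int) + 1) (cols - 1))] := by
  unfold pvRight
  simp only [PySem.List.length_pyRange_one]
  by_cases h : (k : Int) < cols - 1
  · have h1 : min ((k : Int) + 1) (cols - 1) = (k : Int) + 1 := by omega
    have h2 : min (k : Int) (cols - 1) = (k : Int) := by omega
    have hnil1 : PySem.List.pyRange 1 ((k:Int)+1 - ((min ((k:Int)+1) (cols-1) - 0).toNat : Int) + 1) 1 = [] :=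
      PySem.List.pyRange_one_eq_nil (by omega)
    have hnil2 : PySem.List.pyRange 1 ((k:Int) - ((min (k:Int) (cols-1) - 0).toNat : Int) + 1) 1 = [] :=
      PySem.List.pyRange_one_eq_nil (by omega)
    rw [hnil1, hnil2, h1, h2, PySem.List.pyRange_one_succ_right (by omega)]
    simp only [List.map_append, List.map_cons, List.map_nil, List.append_nil]
    have hz : max (0:Int) ((k : Int) + 1 - max (cols - 1) 0) = 0 := by omega
    simp [hz]
  · have h1 : min ((k : Int) + 1) (cols - 1) = min (k : Int) (cols - 1) := by omega
    have h4 : ((min (k:Int) (cols-1) - 0).toNat : Int) = max (cols - 1) 0 ⊓ (k : Int) := by omega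
    rw [h1]
    have hle : (1:Int) ≤ (k:Int) - ((min (k:Int) (cols-1) - 0).toNat : Int) + 1 := by
      rw [h4]; omega
    rw [show (k:Int) + 1 - ((min (k:Int) (cols-1) - 0).toNat : Int) + 1
          = ((k:Int) - ((min (k:Int) (cols-1) - 0).toNat : Int) + 1) + 1 by ring,
        PySem.List.pyRange_one_succ_right hle]
    simp only [List.map_append, List.map_cons, List.map_nil, List.append_assoc]
    have hm : min ((k : Int)) (cols - 1) = cols - 1 := by omega
    have hv : (k:Int) - ((min (k:Int) (cols-1) - 0).toNat : Int) + 1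
        = max 0 ((k : Int) + 1 - max (cols - 1) 0) := by rw [h4]; omega
    rw [hv, hm]

lemma pv_left_zero (rows : Int) : pvLeft rows 0 = [] := by
  unfold pvLeft
  have h1 : PySem.List.pyRange 0 (min 0 rows) 1 = [] :=
    PySem.List.pyRange_one_eq_nil (by omega)
  rw [h1]
  simp

lemma pv_right_zero (cols : Int) : pvRight cols 0 = [] := by
  unfold pvRight
  have h1 : PySem.List.pyRange 0 (min 0 (cols - 1)) 1 = [] :=
    PySem.List.pyRange_one_eq_nil (by omega)
  rw [h1]
  simp

-- B equals the common closed form, together with the equal-length fact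
lemma pv_B (rows cols : Int) : ∀ m : Nat,
    (pvLeft rows m).length = m ∧ (pvRight cols m).length = m ∧
    ((pvLeft rows m).zip (pvRight cols m)).flatMap (fun p => [p.1, p.2])
      = (PySem.List.pyRange 0 (m : Int) 1).flatMap (pvPairs rows cols) := by
  intro m
  induction m with
  | zero =>
      refine ⟨?_, ?_, ?_⟩ <;>
        simp [pv_left_zero, pv_right_zero, PySem.List.pyRange_one_eq_nil (le_refl (0 : Int))]
  | succ k ih =>
      obtain ⟨hl, hr, hz⟩ := ih
      have hcast : ((k + 1 : Nat) : Int) = (k : Int) + 1 := by push_cast; ring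
      rw [hcast, pv_left_succ, pv_right_succ,
          List.zip_append (by rw [hl, hr]), List.flatMap_append, hz,
          PySem.List.pyRange_one_succ_right (by positivity), List.flatMap_append]
      refine ⟨?_, ?_, ?_⟩
      · simp [hl]
      · simp [hr]
      · simp [pvPairs]

theorem pv_eq (rows cols : Int) :
    getStitchingCoords rows cols = getStitchingCoords_alt rows cols := by
  unfold getStitchingCoords getStitchingCoords_alt
  by_cases h : cols + rows - 2 ≤ 0
  · simp only [PySem.List.pyRange_one_eq_nil h, List.foldl_nil]
    -- the left track is empty when n ≤ 0, hence so is the zip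
    have hmin : min (cols + rows - 2) rows ≤ 0 := by omega
    have hnil : pvLeft rows (cols + rows - 2) = [] := by
      unfold pvLeft
      rw [PySem.List.pyRange_one_eq_nil hmin]
      simp only [List.map_nil, List.nil_append, List.length_nil]
      simp
      exact PySem.List.pyRange_one_eq_nil (by omega)
    simp [hnil]
  · have hn : cols + rows - 2 = (((cols + rows - 2).toNat : Nat) : Int) :=
      (Int.toNat_of_nonneg (by omega)).symm
    rw [hn, pv_key, (pv_B rows cols (cols + rows - 2).toNat).2.2]

-- ===== VERDICT (by name: the statement is the Claim_ definition above) =====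
theorem getStitchingCoords_spec : Claim_equal_getStitchingCoords := by
  intro rows cols _
  exact pv_eq rows cols
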